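-- pv_equiv track=rewrite | github.com/AyishatOguntade/Portfolio | Python Programs/Assignments/hw8.py | k_Fletcher32
-- ===== SOURCE A (Python) =====
-- def translateLetter(plaintext):
--     aList = []
--
--     for i in range(len(plaintext)):
--         letterNum = ord(plaintext[i])
--         aList.append(letterNum)
--     return aList
--
-- def fletcher32(plaintext):
--     aList = translateLetter(plaintext)
--     bList = [0]
--     t = 0
--     for i in range(len(aList)):
--         t = (aList[i] + bList[i]) % 65535
--         bList.append(t)
--     checksum = sum(bList)
--
--     return bList
--
-- def k_Fletcher32(plaintext, k):
--     bList = fletcher32(plaintext)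
--     zList = bList
--     zList.remove(0)
--     x = 0
--     kList = [0]
--     while x < k:
--         i = 0
--         while i < len(zList):
--             t = (zList[i] + kList[i]) % 65535
--             kList.append(t)
--             i = i + 1
--         x = x + 1
--         zList = kList.copy()
--         kList = [0]
--     y = len(zList) -1
--     checksum = zList[y]
--
--     return checksum
-- ===== SOURCE B (Python) =====
-- def k_Fletcher32(plaintext, k):
--     r = k if k > 0 else 0
--     total = 0
--     w = 1  # w = C(r + j, j), maintained exactly
--     j = 0
--     for ch in reversed(plaintext):
--         total += ord(ch) * w
--         w = w * (r + j + 1) // (j + 1)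
--         j += 1
--     return total % 65535
-- ===== Notes on version B (the rewrite author's own statement) =====
-- stated objective: faster
-- what changed: A materialises k successive prefix-sum-mod-65535 lists of growing length; B uses the closed form sum(ord(c_i)*C(k+n-1-i,k)) mod 65535, computing the binomial weights in one O(n) pass by the exact recurrence C(r+j+1,j+1)=C(r+j,j)*(r+j+1)//(j+1).
import Mathlib
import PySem

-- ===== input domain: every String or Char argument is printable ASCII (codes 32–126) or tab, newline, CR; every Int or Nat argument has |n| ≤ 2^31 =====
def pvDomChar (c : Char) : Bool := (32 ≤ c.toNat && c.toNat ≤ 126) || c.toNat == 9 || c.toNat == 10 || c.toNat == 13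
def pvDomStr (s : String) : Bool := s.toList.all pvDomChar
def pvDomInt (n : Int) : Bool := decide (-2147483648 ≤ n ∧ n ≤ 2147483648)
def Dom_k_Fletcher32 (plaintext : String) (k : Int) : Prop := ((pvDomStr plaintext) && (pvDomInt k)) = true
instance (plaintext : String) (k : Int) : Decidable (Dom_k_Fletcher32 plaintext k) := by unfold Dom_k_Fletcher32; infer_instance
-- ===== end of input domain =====

-- B replaces A's k materialised prefix-sum-mod lists by the closed-form binomial-weighted
-- sum of the character codes (objective: faster).

-- ===== PORT A =====

def translateLetterA (plaintext : String) : List Int :=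
  (PySem.List.pyRange 0 (PySem.Str.len plaintext) 1).foldl
    (fun aList i => aList ++ [((PySem.List.pyGetD plaintext.toList i 'a').toNat : Int)]) []

def fletcher32A (plaintext : String) : List Int :=
  let aList := translateLetterA plaintext
  -- (the Python also computes 'checksum = sum(bList)', dead code, not ported)
  (PySem.List.pyRange 0 (aList.length : Int) 1).foldl
    (fun bList i =>
      bList ++ [PySem.Int.mod (PySem.List.pyGetD aList i 0 + PySem.List.pyGetD bList i 0) 65535])
    [0]

-- inner 'while i < len(zList)' loop
def kFletchInner (zList : List Int) (kList : List Int) (i : Int) : List Int :=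
  if _h : i < (zList.length : Int) then
    kFletchInner zList
      (kList ++ [PySem.Int.mod (PySem.List.pyGetD zList i 0 + PySem.List.pyGetD kList i 0) 65535])
      (i + 1)
  else kList
termination_by ((zList.length : Int) - i).toNat
decreasing_by omega

-- outer 'while x < k' loop
def kFletchOuter (k x : Int) (zList kList : List Int) : List Int :=
  if _h : x < k then
    kFletchOuter k (x + 1) (kFletchInner zList kList 0) [0]
  else zList
termination_by (k - x).toNat
decreasing_by omega

def k_Fletcher32 (plaintext : String) (k : Int) : Int :=
  let bList := fletcher32A plaintext
  let zList := (PySem.List.remove? bList 0).getD []   -- zList.remove(0); 0 is bList's head, never a ValueError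
  let zFinal := kFletchOuter k 0 zList [0]
  let y : Int := (zFinal.length : Int) - 1
  (PySem.List.pyGet? zFinal y).getD 0   -- zList[y]; none (IndexError) only outside Pre_

-- ===== PORT B =====

def k_Fletcher32_alt (plaintext : String) (k : Int) : Int :=
  let r : Int := if k > 0 then k else 0
  let st := plaintext.toList.reverse.foldl
    (fun (st : Int × Int × Int) ch =>
      (st.1 + (ch.toNat : Int) * st.2.1,
       PySem.Int.floordiv (st.2.1 * (r + st.2.2 + 1)) (st.2.2 + 1),
       st.2.2 + 1))
    (0, 1, 0)
  PySem.Int.mod st.1 65535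

-- ===== PRECONDITION & SPEC =====
-- Pre_ excludes exactly the inputs where A raises: the empty string with k ≤ 0
-- (then zList is empty and zList[-1] is an IndexError).
def Pre_k_Fletcher32 (plaintext : String) (k : Int) : Prop := plaintext ≠ "" ∨ 1 ≤ k
instance (plaintext : String) (k : Int) : Decidable (Pre_k_Fletcher32 plaintext k) := by
  unfold Pre_k_Fletcher32; infer_instance

def pvWitness_k_Fletcher32 : String × Int := ("ab", 2)

def Spec_k_Fletcher32 (plaintext : String) (k : Int) (out : Int) : Prop := out = k_Fletcher32_alt plaintext k
instance (plaintext : String) (k : Int) (out : Int) : Decidable (Spec_k_Fletcher32 plaintext k out) := by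
  unfold Spec_k_Fletcher32; infer_instance

-- ===== CLAIM (what is proved, stated in full; the proofs are below) =====
def Claim_equal_k_Fletcher32 : Prop := ∀ (plaintext : String) (k : Int), Dom_k_Fletcher32 plaintext k → Pre_k_Fletcher32 plaintext k → Spec_k_Fletcher32 plaintext k (k_Fletcher32 plaintext k)

-- ===== LEMMAS AND PROOFS =====

-- models: the prefix-sum scans with and without the mod, and the per-round step
def pvScanM (acc : Int) : List Int → List Int
  | [] => []
  | a :: t => ((a + acc) % 65535) :: pvScanM ((a + acc) % 65535) t

def pvScanN (acc : Int) : List Int → List Int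
  | [] => []
  | a :: t => (a + acc) :: pvScanN (a + acc) t

def pvStepM (z : List Int) : List Int := 0 :: pvScanM 0 z
def pvStepN (z : List Int) : List Int := 0 :: pvScanN 0 z

def pvRun (acc : Int) (l : List Int) : Int := l.foldl (fun s x => (x + s) % 65535) acc

def pvOrd (c : Char) : Int := (c.toNat : Int)

-- the prefix-sum operator on sequences
def pvPN (f : ℕ → Int) : ℕ → Int := fun j => ∑ i ∈ Finset.range j, f i

theorem pv_modm (x : Int) : PySem.Int.mod x 65535 = x % 65535 :=
  PySem.Int.mod_eq_emod_of_pos (by norm_num)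

theorem pv_length_scanN (a : Int) (l : List Int) : (pvScanN a l).length = l.length := by
  induction l generalizing a with
  | nil => rfl
  | cons b t ih => simp [pvScanN, ih]

-- translateLetter builds the list of character codes
theorem pv_translate (p : String) :
    translateLetterA p = p.toList.map pvOrd := by
  unfold translateLetterA
  rw [PySem.Str.len_eq]
  rw [PySem.List.foldl_pyRange_zero_pyGetD' p.toList 'a'
      (fun acc c => acc ++ [((c.toNat : ℕ) : Int)]) []]
  rw [PySem.List.foldl_append_singleton_eq_map]
  rfl

theorem pv_scanM_last : ∀ (l : List Int) (acc : Int),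
    (acc :: pvScanM acc l).getD l.length 0 = pvRun acc l := by
  intro l
  induction l with
  | nil => intro acc; simp [pvScanM, pvRun]
  | cons b t ih =>
    intro acc
    show (acc :: ((b + acc) % 65535) :: pvScanM ((b + acc) % 65535) t).getD (t.length + 1) 0 = _
    rw [List.getD_cons_succ]
    exact ih ((b + acc) % 65535)

theorem pv_scanM_snoc : ∀ (l : List Int) (acc a : Int),
    pvScanM acc (l ++ [a]) = pvScanM acc l ++ [(a + pvRun acc l) % 65535] := by
  intro l
  induction l with
  | nil => intro acc a; simp [pvScanM, pvRun]
  | cons b t ih =>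
    intro acc a
    show ((b + acc) % 65535) :: pvScanM ((b + acc) % 65535) (t ++ [a]) = _
    rw [ih]
    simp [pvScanM, pvRun]

-- the fletcher32 loop is the mod prefix-sum scan of the first n codes
theorem pv_fl_inv (aL : List Int) : ∀ (n : ℕ), n ≤ aL.length →
    (PySem.List.pyRange 0 (n : Int) 1).foldl
      (fun bList i =>
        bList ++ [PySem.Int.mod (PySem.List.pyGetD aL i 0 + PySem.List.pyGetD bList i 0) 65535])
      [0]
    = 0 :: pvScanM 0 (aL.take n) := by
  intro n
  induction n with
  | zero => intro _; simp [pvScanM, PySem.List.pyRange]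
  | succ n ih =>
    intro hn
    have hcast : ((n + 1 : ℕ) : Int) = (n : Int) + 1 := by push_cast; ring
    rw [hcast, PySem.List.pyRange_one_succ_right (by positivity), List.foldl_append,
        ih (by omega)]
    simp only [List.foldl_cons, List.foldl_nil]
    have hlen : (aL.take n).length = n := by simp; omega
    have hB : PySem.List.pyGetD (0 :: pvScanM 0 (aL.take n)) (n : Int) 0 = pvRun 0 (aL.take n) := by
      rw [PySem.List.pyGetD_natCast]
      have h := pv_scanM_last (aL.take n) 0
      rw [hlen] at h
      exact h
    have hA : PySem.List.pyGetD aL (n : Int) 0 = aL[n] := by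
      rw [PySem.List.pyGetD_natCast, List.getD, List.getElem?_eq_getElem (by omega)]
      rfl
    rw [hB, hA, List.take_succ_eq_append_getElem (by omega), pv_scanM_snoc, pv_modm]
    rfl

theorem pv_fletcher (p : String) :
    fletcher32A p = 0 :: pvScanM 0 (p.toList.map pvOrd) := by
  unfold fletcher32A
  rw [pv_translate]
  have := pv_fl_inv (p.toList.map pvOrd) (p.toList.map pvOrd).length (le_refl _)
  rw [this, List.take_length]

-- the inner while loop is one scan step
theorem pv_inner_gen (z : List Int) : ∀ (d i : ℕ) (kl : List Int), z.length - i = d → kl.length = i + 1 →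
    kFletchInner z kl (i : Int) = kl ++ pvScanM (kl.getD i 0) (z.drop i) := by
  intro d
  induction d with
  | zero =>
    intro i kl hd _
    rw [kFletchInner]
    have : ¬ ((i : Int) < (z.length : Int)) := by omega
    simp only [this, dite_false]
    rw [List.drop_of_length_le (by omega)]
    simp [pvScanM]
  | succ d ih =>
    intro i kl hd hkl
    have hi : i < z.length := by omega
    rw [kFletchInner]
    have hlt : ((i : Int) < (z.length : Int)) := by omega
    simp only [hlt, dite_true]
    have hcast : (i : Int) + 1 = ((i + 1 : ℕ) : Int) := by push_cast; ring
    rw [hcast]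
    set t := PySem.Int.mod (PySem.List.pyGetD z (i:Int) 0 + PySem.List.pyGetD kl (i:Int) 0) 65535 with ht
    rw [ih (i+1) (kl ++ [t]) (by omega) (by simp [hkl])]
    have hget : (kl ++ [t]).getD (i + 1) 0 = t := by
      rw [List.getD, List.getElem?_append_right (by omega)]
      simp [hkl]
    rw [hget]
    rw [List.drop_eq_getElem_cons hi]
    have htval : t = (z[i] + kl.getD i 0) % 65535 := by
      rw [ht, pv_modm]
      simp [List.getD, List.getElem?_eq_getElem hi]
    rw [pvScanM, ← htval, List.append_assoc]
    rfl

theorem pv_inner (z : List Int) : kFletchInner z [0] 0 = pvStepM z := by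
  have := pv_inner_gen z z.length 0 [0] (by omega) (by simp)
  simpa [pvStepM] using this

-- the outer while loop iterates the step
theorem pv_outer (k : Int) : ∀ (d : ℕ) (x : Int) (z : List Int), (k - x).toNat = d →
    kFletchOuter k x z [0] = pvStepM^[d] z := by
  intro d
  induction d with
  | zero =>
    intro x z hd
    rw [kFletchOuter]
    have : ¬ (x < k) := by omega
    simp [this]
  | succ d ih =>
    intro x z hd
    rw [kFletchOuter]
    have hlt : x < k := by omega
    simp only [hlt, dite_true]
    rw [pv_inner, ih (x+1) (pvStepM z) (by omega), ← Function.iterate_succ_apply]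

-- mod elimination: the mod scan is the plain scan reduced pointwise
theorem pv_scanM_mod (zN : List Int) : ∀ (z : List Int) (a aN : Int),
    z.map (· % 65535) = zN.map (· % 65535) → a % 65535 = aN % 65535 →
    pvScanM a z = (pvScanN aN zN).map (· % 65535) := by
  induction zN with
  | nil => intro z a aN hz _; cases z with
    | nil => simp [pvScanM, pvScanN]
    | cons b t => simp at hz
  | cons bN tN ih =>
    intro z a aN hz ha
    cases z with
    | nil => simp at hz
    | cons b t =>
      simp only [List.map_cons, List.cons.injEq] at hz
      obtain ⟨hb, ht⟩ := hz
      simp only [pvScanM, pvScanN, List.map_cons]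
      have h1 : (b + a) % 65535 = (bN + aN) % 65535 := by
        rw [Int.add_emod, hb, ha, ← Int.add_emod]
      refine List.cons_eq_cons.mpr ⟨h1, ?_⟩
      exact ih t ((b + a) % 65535) (bN + aN) ht (by rw [Int.emod_emod_of_dvd _ dvd_rfl, h1])

theorem pv_iter_mod (cs : List Int) (r : ℕ) :
    pvStepM^[r] (pvScanM 0 cs) = (pvStepN^[r] (pvScanN 0 cs)).map (· % 65535) := by
  induction r with
  | zero =>
    simpa using pv_scanM_mod cs cs 0 0 rfl rfl
  | succ r ih =>
    rw [Function.iterate_succ_apply', Function.iterate_succ_apply', ih]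
    show pvStepM ((pvStepN^[r] (pvScanN 0 cs)).map (· % 65535)) = _
    unfold pvStepM pvStepN
    simp only [List.map_cons]
    refine List.cons_eq_cons.mpr ⟨by norm_num, ?_⟩
    refine pv_scanM_mod _ _ 0 0 ?_ rfl
    simp only [List.map_map]
    apply List.map_congr_left
    intro x _
    simp [Int.emod_emod_of_dvd _ dvd_rfl]

-- entries of the plain scan are sums
theorem pv_scanN_getD (l : List Int) : ∀ (a : Int) (j : ℕ), j < l.length →
    (pvScanN a l).getD j 0 = a + ∑ i ∈ Finset.range (j + 1), l.getD i 0 := by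
  induction l with
  | nil => intro a j h; simp at h
  | cons b t ih =>
    intro a j h
    cases j with
    | zero => simp [pvScanN]; ring
    | succ j =>
      simp only [pvScanN, List.getD_cons_succ]
      rw [ih (b + a) j (by simpa using h), Finset.sum_range_succ' _ (j + 1)]
      simp
      ring

theorem pv_stepN_getD (z : List Int) (j : ℕ) (hj : j ≤ z.length) :
    (pvStepN z).getD j 0 = ∑ i ∈ Finset.range j, z.getD i 0 := by
  cases j with
  | zero => simp [pvStepN]
  | succ j =>
    simp only [pvStepN, List.getD_cons_succ]
    rw [pv_scanN_getD z 0 j (by omega)]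
    simp

-- hockey stick
theorem pv_hockey (r : ℕ) : ∀ (S : ℕ), ∑ s ∈ Finset.range S, ((s.choose r : ℕ) : Int) = (S.choose (r + 1) : Int) := by
  intro S
  induction S with
  | zero => simp
  | succ S ih =>
    rw [Finset.sum_range_succ, ih, Nat.choose_succ_succ']
    push_cast; ring

-- closed form of the iterated prefix-sum operator
theorem pv_PN_iter (r : ℕ) : ∀ (f : ℕ → Int) (j : ℕ),
    pvPN^[r + 1] f j = ∑ i ∈ Finset.range j, f i * ((j - 1 - i).choose r : Int) := by
  induction r with
  | zero =>
    intro f j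
    simp [pvPN]
  | succ r ih =>
    intro f j
    rw [Function.iterate_succ_apply, ih (pvPN f) j]
    have ext : ∀ i ∈ Finset.range j,
        pvPN f i * ((j - 1 - i).choose r : Int)
          = ∑ t ∈ Finset.range j, (if t < i then f t * ((j - 1 - i).choose r : Int) else 0) := by
      intro i hi
      simp only [Finset.mem_range] at hi
      rw [pvPN, Finset.sum_mul, ← Finset.sum_filter]
      congr 1
      ext t; simp; omega
    rw [Finset.sum_congr rfl ext, Finset.sum_comm]
    refine Finset.sum_congr rfl ?_
    intro t ht
    simp only [Finset.mem_range] at ht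
    rw [← Finset.sum_filter]
    have hf : (Finset.range j).filter (fun i => t < i) = Finset.Ico (t + 1) j := by
      ext i; simp; omega
    rw [hf, ← Finset.mul_sum]
    congr 1
    rw [Finset.sum_Ico_eq_sum_range]
    have hN : j - (t + 1) = j - 1 - t := by omega
    rw [hN, ← pv_hockey r (j - 1 - t),
       ← Finset.sum_range_reflect (fun s => ((s.choose r : ℕ) : Int)) (j - 1 - t)]
    refine Finset.sum_congr rfl ?_
    intro s hs
    simp only [Finset.mem_range] at hs
    congr 2
    omega

theorem pv_length_stageN (cs : List Int) (r : ℕ) :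
    (pvStepN^[r] (pvScanN 0 cs)).length = cs.length + r := by
  induction r with
  | zero => simp [pv_length_scanN]
  | succ r ih =>
    rw [Function.iterate_succ_apply']
    show (pvStepN _).length = _
    simp [pvStepN, pv_length_scanN, ih]; omega

-- entries of the r-th stage
theorem pv_stage_entry (cs : List Int) (r : ℕ) : ∀ (j : ℕ), j < cs.length + r →
    (pvStepN^[r] (pvScanN 0 cs)).getD j 0 = pvPN^[r + 1] (fun i => cs.getD i 0) (j + 1) := by
  induction r with
  | zero =>
    intro j hj
    rw [Function.iterate_one, Function.iterate_zero_apply]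
    rw [pv_scanN_getD cs 0 j (by omega)]
    simp [pvPN]
  | succ r ih =>
    intro j hj
    rw [Function.iterate_succ_apply']
    rw [pv_stepN_getD _ j (by rw [pv_length_stageN]; omega)]
    have hsum : ∀ i ∈ Finset.range j, (pvStepN^[r] (pvScanN 0 cs)).getD i 0
        = pvPN^[r + 1] (fun i => cs.getD i 0) (i + 1) := by
      intro i hi
      simp only [Finset.mem_range] at hi
      exact ih i (by omega)
    rw [Finset.sum_congr rfl hsum]
    conv_rhs => rw [show r + 1 + 1 = (r + 1) + 1 from rfl, Function.iterate_succ_apply']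
    have hrhs : pvPN (pvPN^[r + 1] (fun i => cs.getD i 0)) (j + 1)
        = ∑ i ∈ Finset.range (j + 1), pvPN^[r + 1] (fun i => cs.getD i 0) i := rfl
    rw [hrhs, Finset.sum_range_succ' _ j]
    have h0 : pvPN^[r + 1] (fun i => cs.getD i 0) 0 = 0 := by
      rw [Function.iterate_succ_apply']
      show pvPN _ 0 = 0
      simp [pvPN]
    rw [h0, add_zero]

-- exact division step of B's weight recurrence
theorem pv_weight_step (K j : ℕ) :
    PySem.Int.floordiv (((K + j).choose j : Int) * ((K : Int) + (j : Int) + 1)) ((j : Int) + 1)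
      = (((K + j + 1).choose (j + 1) : ℕ) : Int) := by
  have hid : (K + j + 1) * (K + j).choose j = (K + j + 1).choose (j + 1) * (j + 1) :=
    Nat.add_one_mul_choose_eq (K + j) j
  have hnum : ((K + j).choose j : Int) * ((K : Int) + (j : Int) + 1)
      = (((K + j + 1).choose (j + 1) : ℕ) : Int) * ((j : Int) + 1) := by
    push_cast at hid ⊢
    linarith [hid]
  rw [hnum, PySem.Int.floordiv_eq_ediv_of_pos (by positivity)]
  exact Int.mul_ediv_cancel _ (by positivity)

-- B's fold invariant: the loop keeps w = C(K+j, j) and accumulates the weighted sum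
theorem pv_fold_B (K : ℕ) (l : List Char) : ∀ (j0 : ℕ) (total : Int),
    (l.foldl
      (fun (st : Int × Int × Int) ch =>
        (st.1 + (ch.toNat : Int) * st.2.1,
         PySem.Int.floordiv (st.2.1 * ((K : Int) + st.2.2 + 1)) (st.2.2 + 1),
         st.2.2 + 1))
      (total, (((K + j0).choose j0 : ℕ) : Int), (j0 : Int)))
    = (total + ∑ t ∈ Finset.range l.length, pvOrd (l.getD t ' ') * (((K + j0 + t).choose (j0 + t) : ℕ) : Int),
       (((K + j0 + l.length).choose (j0 + l.length) : ℕ) : Int),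
       ((j0 + l.length : ℕ) : Int)) := by
  induction l with
  | nil => intro j0 total; simp
  | cons ch t ih =>
    intro j0 total
    rw [List.foldl_cons]
    have hw : PySem.Int.floordiv ((((K + j0).choose j0 : ℕ) : Int) * ((K : Int) + (j0 : Int) + 1)) ((j0 : Int) + 1)
        = (((K + (j0 + 1)).choose (j0 + 1) : ℕ) : Int) := by
      rw [pv_weight_step K j0, show K + (j0 + 1) = K + j0 + 1 from by omega]
    show (t.foldl _ (total + (ch.toNat : Int) * (((K + j0).choose j0 : ℕ) : Int),
        PySem.Int.floordiv ((((K + j0).choose j0 : ℕ) : Int) * ((K : Int) + (j0 : Int) + 1)) ((j0 : Int) + 1),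
        (j0 : Int) + 1)) = _
    rw [hw]
    have hcast : (j0 : Int) + 1 = ((j0 + 1 : ℕ) : Int) := by push_cast; ring
    rw [hcast, ih (j0 + 1) _]
    refine Prod.ext ?_ (Prod.ext ?_ ?_) <;> simp only
    · conv_rhs => rw [show (ch :: t).length = t.length + 1 from rfl, Finset.sum_range_succ' _ t.length]
      simp only [List.getD_cons_succ, List.getD_cons_zero, Nat.add_zero]
      have hs : ∀ t1 ∈ Finset.range t.length,
          pvOrd (t.getD t1 ' ') * (((K + (j0 + 1) + t1).choose (j0 + 1 + t1) : ℕ) : Int)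
          = pvOrd (t.getD t1 ' ') * (((K + j0 + (t1 + 1)).choose (j0 + (t1 + 1)) : ℕ) : Int) := by
        intro t1 _
        rw [show K + (j0 + 1) + t1 = K + j0 + (t1 + 1) from by omega,
            show j0 + 1 + t1 = j0 + (t1 + 1) from by omega]
      rw [Finset.sum_congr rfl hs]
      unfold pvOrd
      ring
    · simp only [List.length_cons]
      congr 2 <;> omega
    · simp only [List.length_cons]
      omega

theorem pv_r_eq (k : Int) : (if k > 0 then k else 0) = (k.toNat : Int) := by
  split_ifs with h <;> omega

-- the two closed-form sums coincide (reverse + choose symmetry)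
theorem pv_sum_reflect (cs : List Char) (K : ℕ) :
    ∑ t ∈ Finset.range cs.reverse.length, pvOrd (cs.reverse.getD t ' ') * (((K + 0 + t).choose (0 + t) : ℕ) : Int)
      = ∑ i ∈ Finset.range cs.length, (cs.map pvOrd).getD i 0 * (((cs.length + K - 1 - i).choose K : ℕ) : Int) := by
  rw [← Finset.sum_range_reflect (fun i => (cs.map pvOrd).getD i 0 * (((cs.length + K - 1 - i).choose K : ℕ) : Int)) cs.length]
  rw [List.length_reverse]
  refine Finset.sum_congr rfl ?_
  intro t ht
  simp only [Finset.mem_range] at ht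
  have h1 : cs.reverse.getD t ' ' = cs[cs.length - 1 - t] := by
    rw [List.getD, List.getElem?_eq_getElem (by simp; omega)]
    simp [List.getElem_reverse]
  have h2 : (cs.map pvOrd).getD (cs.length - 1 - t) 0 = pvOrd (cs[cs.length - 1 - t]) := by
    rw [List.getD, List.getElem?_eq_getElem (by simp; omega)]
    simp
  rw [h1, h2]
  congr 1
  rw [show cs.length + K - 1 - (cs.length - 1 - t) = K + t from by omega,
      show K + 0 + t = K + t from by omega, show 0 + t = t from by omega]
  have h := Nat.choose_symm (n := K + t) (k := K) (by omega)
  rw [show K + t - K = t from by omega] at h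
  rw [h]

-- ===== VERDICT (by name: the statement is the Claim_ definition above) =====
theorem k_Fletcher32_spec : Claim_equal_k_Fletcher32 := by
  intro p k _ hpre
  unfold Spec_k_Fletcher32
  have hne : 1 ≤ p.toList.length + k.toNat := by
    rcases hpre with h | h
    · have hnil : p.toList ≠ [] := fun hn => h (String.toList_eq_nil_iff.mp hn)
      have : 0 < p.toList.length := List.length_pos_iff.mpr hnil
      omega
    · omega
  -- A's value: the last entry of the K-th stage, reduced mod 65535
  have hA : k_Fletcher32 p k
      = ((pvStepN^[k.toNat] (pvScanN 0 (p.toList.map pvOrd))).getD (p.toList.length + k.toNat - 1) 0) % 65535 := by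
    simp only [k_Fletcher32]
    rw [pv_fletcher, PySem.List.remove?_cons_self, Option.getD_some,
        pv_outer k k.toNat 0 _ (by omega), pv_iter_mod]
    rw [List.length_map, pv_length_stageN, List.length_map]
    rw [show ((p.toList.length + k.toNat : ℕ) : Int) - 1
          = ((p.toList.length + k.toNat - 1 : ℕ) : Int) from by omega]
    rw [PySem.List.pyGet?_natCast,
        List.getElem?_eq_getElem (by rw [List.length_map, pv_length_stageN, List.length_map]; omega),
        Option.getD_some, List.getElem_map]
    congr 1
    rw [List.getD, List.getElem?_eq_getElem (by rw [pv_length_stageN, List.length_map]; omega),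
        Option.getD_some]
  rw [hA]
  -- A's closed form
  rw [pv_stage_entry _ k.toNat _ (by rw [List.length_map]; omega),
      show p.toList.length + k.toNat - 1 + 1 = p.toList.length + k.toNat from by omega,
      pv_PN_iter]
  -- truncate the sum to range n (the padding terms are 0)
  have htrunc : ∑ i ∈ Finset.range (p.toList.length + k.toNat),
        (p.toList.map pvOrd).getD i 0 * ((p.toList.length + k.toNat - 1 - i).choose k.toNat : Int)
      = ∑ i ∈ Finset.range p.toList.length,
        (p.toList.map pvOrd).getD i 0 * ((p.toList.length + k.toNat - 1 - i).choose k.toNat : Int) := by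
    symm
    refine Finset.sum_subset (Finset.range_subset.mpr ?_) ?_
    · intro x hx
      simp only [Finset.mem_range]
      omega
    intro i _ hni
    simp only [Finset.mem_range, not_lt] at hni
    rw [List.getD_eq_default _ _ (by rw [List.length_map]; omega), zero_mul]
  rw [htrunc]
  -- B's value: the fold keeps the binomial weight, then reflect the sum
  simp only [k_Fletcher32_alt]
  rw [pv_r_eq]
  have hfold := pv_fold_B k.toNat p.toList.reverse 0 0
  rw [show (((k.toNat + 0).choose 0 : ℕ) : Int) = (1 : Int) from by simp,
      show ((0 : ℕ) : Int) = (0 : Int) from rfl] at hfold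
  rw [hfold, pv_modm, zero_add, pv_sum_reflect p.toList k.toNat]
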